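-- pv_equiv track=rewrite | github.com/carrdelling/AdventOfCode2016 | day7/gold.py | is_ssl
-- ===== SOURCE A (Python) =====
-- def is_ssl(ip):
--
--     inside_patterns = set()
--     outside_patterns = set()
--
--     buffer = []
--     in_brackets = False
--     for c in ip:
--
--         if c == '[' and not in_brackets:
--             in_brackets = True
--             buffer = []
--             continue
--         if c == ']' and in_brackets:
--             in_brackets = False
--             buffer = []
--             continue
--
--         buffer.append(c)
--
--         if len(buffer) > 2:
--             if (buffer[-3] == buffer[-1]) and (buffer[-3] != buffer[-2]):
--
--                 if in_brackets:
--                     new_pattern = (buffer[-3], buffer[-2], buffer[-1])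
--                     inside_patterns.add(new_pattern)
--                 else:
--                     reverse_pattern = (buffer[-2], buffer[-1], buffer[-2])
--                     outside_patterns.add(reverse_pattern)
--
--     is_valid = len(inside_patterns & outside_patterns) > 0
--
--     return is_valid
-- ===== SOURCE B (Python) =====
-- def _abas(s):
--     return [(a, b) for a, b, c in zip(s, s[1:], s[2:]) if a == c and a != b]
--
--
-- def is_ssl(ip):
--     outside, inside = [], []
--     cur, in_brackets = "", False
--     for c in ip:
--         if c == '[' and not in_brackets:
--             outside.append(cur)
--             cur, in_brackets = "", True
--         elif c == ']' and in_brackets: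
--             inside.append(cur)
--             cur, in_brackets = "", False
--         else:
--             cur += c
--     (inside if in_brackets else outside).append(cur)
--     abas = set()
--     for s in outside:
--         abas.update(_abas(s))
--     return any((b, a) in abas for s in inside for a, b in _abas(s))
-- ===== Notes on version B (the rewrite author's own statement) =====
-- stated objective: alternative
-- what changed: A interleaves parsing and pattern collection in one state machine that fills two sets of character triples; B first segments the string into inside/outside-bracket segments with the same toggling rule, then extracts aba windows per segment via zip and matches them through a single set of (a,b) pairs.
import Mathlib
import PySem

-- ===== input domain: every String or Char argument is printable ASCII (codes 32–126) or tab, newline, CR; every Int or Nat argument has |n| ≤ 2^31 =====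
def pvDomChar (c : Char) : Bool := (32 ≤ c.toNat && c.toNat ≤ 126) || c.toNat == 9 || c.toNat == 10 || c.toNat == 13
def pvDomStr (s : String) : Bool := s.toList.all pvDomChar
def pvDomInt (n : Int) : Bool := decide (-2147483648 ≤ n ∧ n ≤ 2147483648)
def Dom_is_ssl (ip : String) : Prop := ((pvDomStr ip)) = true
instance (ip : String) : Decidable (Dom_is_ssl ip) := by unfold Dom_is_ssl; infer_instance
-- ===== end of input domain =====

-- B replaces A's interleaved state machine (two sets of triples filled while scanning) by two phases:
-- segment the string with the same bracket toggling, then extract aba windows per segment and match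
-- them through one set of pairs; objective: alternative decomposition, same cost.

-- ===== PORT A =====
-- one iteration of A's `for c in ip` loop; state = (inside_patterns, outside_patterns, buffer, in_brackets)
def pvStepA (st : PySem.Set (Char × Char × Char) × PySem.Set (Char × Char × Char) × List Char × Bool)
    (c : Char) : PySem.Set (Char × Char × Char) × PySem.Set (Char × Char × Char) × List Char × Bool :=
  let ins := st.1; let outs := st.2.1; let buffer := st.2.2.1; let inb := st.2.2.2
  if c = '[' ∧ inb = false then (ins, outs, [], true)
  else if c = ']' ∧ inb = true then (ins, outs, [], false)
  else
    let buffer := buffer ++ [c]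
    if buffer.length > 2 then
      if PySem.List.pyGetD buffer (-3) c = PySem.List.pyGetD buffer (-1) c ∧
         PySem.List.pyGetD buffer (-3) c ≠ PySem.List.pyGetD buffer (-2) c then
        if inb then
          (PySem.Set.add ins (PySem.List.pyGetD buffer (-3) c, PySem.List.pyGetD buffer (-2) c,
             PySem.List.pyGetD buffer (-1) c), outs, buffer, inb)
        else
          (ins, PySem.Set.add outs (PySem.List.pyGetD buffer (-2) c, PySem.List.pyGetD buffer (-1) c,
             PySem.List.pyGetD buffer (-2) c), buffer, inb)
      else (ins, outs, buffer, inb)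
    else (ins, outs, buffer, inb)

def is_ssl (ip : String) : Bool :=
  let st := ip.toList.foldl pvStepA (PySem.Set.empty, PySem.Set.empty, [], false)
  decide (0 < (PySem.Set.inter st.1 st.2.1).length)

-- ===== PORT B =====
-- _abas(s): [(a, b) for a, b, c in zip(s, s[1:], s[2:]) if a == c and a != b]
def pvAbas (s : List Char) : List (Char × Char) :=
  ((s.zip ((PySem.List.slice s (some 1) none).zip (PySem.List.slice s (some 2) none))).filter
      (fun t => t.1 == t.2.2 && t.1 != t.2.1)).map (fun t => (t.1, t.2.1))

-- one iteration of B's segmentation loop; state = (outside, inside, cur, in_brackets)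
def pvStepS (st : List (List Char) × List (List Char) × List Char × Bool) (c : Char) :
    List (List Char) × List (List Char) × List Char × Bool :=
  let outs := st.1; let ins := st.2.1; let cur := st.2.2.1; let inb := st.2.2.2
  if c = '[' ∧ inb = false then (outs ++ [cur], ins, [], true)
  else if c = ']' ∧ inb = true then (outs, ins ++ [cur], [], false)
  else (outs, ins, cur ++ [c], inb)

def is_ssl_alt (ip : String) : Bool :=
  let st := ip.toList.foldl pvStepS ([], [], [], false)
  let fin := if st.2.2.2 then (st.1, st.2.1 ++ [st.2.2.1]) else (st.1 ++ [st.2.2.1], st.2.1)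
  let abas : PySem.Set (Char × Char) :=
    fin.1.foldl (fun ab s => PySem.Set.update ab (pvAbas s)) PySem.Set.empty
  fin.2.any (fun s => (pvAbas s).any (fun p => PySem.Set.contains abas (p.2, p.1)))

-- ===== PRECONDITION & SPEC =====
def Spec_is_ssl (ip : String) (out : Bool) : Prop := out = is_ssl_alt ip
instance (ip : String) (out : Bool) : Decidable (Spec_is_ssl ip out) := by unfold Spec_is_ssl; infer_instance

-- ===== CLAIM (what is proved, stated in full; the proofs are below) =====
def Claim_equal_is_ssl : Prop := ∀ (ip : String), Dom_is_ssl ip → Spec_is_ssl ip (is_ssl ip)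

-- ===== LEMMAS AND PROOFS =====

-- recursive form of B's aba-window pairs of a segment
def pvAbaR : List Char → List (Char × Char)
  | a :: b :: c :: rest => (if a = c ∧ a ≠ b then [(a, b)] else []) ++ pvAbaR (b :: c :: rest)
  | _ => []

theorem pvAbaR_snoc3 (l : List Char) (a b c : Char) :
    pvAbaR (l ++ [a, b, c]) = pvAbaR (l ++ [a, b]) ++ (if a = c ∧ a ≠ b then [(a, b)] else []) := by
  induction l with
  | nil => simp [pvAbaR]
  | cons x l ih =>
      cases l with
      | nil => simp [pvAbaR]
      | cons y l' =>
          cases l' with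
          | nil => simp only [List.cons_append, List.nil_append, pvAbaR] at *; rw [ih]; simp [List.append_assoc]
          | cons z l'' =>
              simp only [List.cons_append, pvAbaR] at *
              rw [ih]; simp [List.append_assoc]

theorem g1 (l : List Char) (a b c d : Char) : PySem.List.pyGetD (l ++ [a,b,c]) (-1) d = c := by
  have h : l ++ [a,b,c] = (l ++ [a,b]) ++ [c] := by simp
  rw [h, PySem.List.pyGetD_neg_one_append_singleton]
theorem g2 (l : List Char) (a b c d : Char) : PySem.List.pyGetD (l ++ [a,b,c]) (-2) d = b := by
  rw [PySem.List.pyGetD_neg_ofNat _ 2 d (by omega) (by simp)]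
  rw [List.getElem_append_right (by simp)]; simp
theorem g3 (l : List Char) (a b c d : Char) : PySem.List.pyGetD (l ++ [a,b,c]) (-3) d = a := by
  rw [PySem.List.pyGetD_neg_ofNat _ 3 d (by omega) (by simp)]
  rw [List.getElem_append_right (by simp)]; simp

-- windows feeding one of A's pattern sets: completed segments plus the live buffer
def pvWins (segs : List (List Char)) (buf : List Char) (use : Bool) : List (Char × Char) :=
  segs.flatMap pvAbaR ++ (if use then pvAbaR buf else [])

theorem pv_inv (cs : List Char) :
    ∀ (I O : PySem.Set (Char × Char × Char)) (buf : List Char) (flag : Bool)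
      (outs ins : List (List Char)),
    (∀ t, t ∈ I ↔ ∃ p ∈ pvWins ins buf flag, t = (p.1, p.2, p.1)) →
    (∀ t, t ∈ O ↔ ∃ p ∈ pvWins outs buf (!flag), t = (p.2, p.1, p.2)) →
    (cs.foldl pvStepA (I, O, buf, flag)).2.2.1 = (cs.foldl pvStepS (outs, ins, buf, flag)).2.2.1 ∧
    (cs.foldl pvStepA (I, O, buf, flag)).2.2.2 = (cs.foldl pvStepS (outs, ins, buf, flag)).2.2.2 ∧
    (∀ t, t ∈ (cs.foldl pvStepA (I, O, buf, flag)).1 ↔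
        ∃ p ∈ pvWins (cs.foldl pvStepS (outs, ins, buf, flag)).2.1
            (cs.foldl pvStepS (outs, ins, buf, flag)).2.2.1
            (cs.foldl pvStepS (outs, ins, buf, flag)).2.2.2, t = (p.1, p.2, p.1)) ∧
    (∀ t, t ∈ (cs.foldl pvStepA (I, O, buf, flag)).2.1 ↔
        ∃ p ∈ pvWins (cs.foldl pvStepS (outs, ins, buf, flag)).1
            (cs.foldl pvStepS (outs, ins, buf, flag)).2.2.1
            (!(cs.foldl pvStepS (outs, ins, buf, flag)).2.2.2), t = (p.2, p.1, p.2)) := by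
  induction cs with
  | nil =>
      intro I O buf flag outs ins hI hO
      exact ⟨rfl, rfl, hI, hO⟩
  | cons c cs ih =>
      intro I O buf flag outs ins hI hO
      simp only [List.foldl_cons]
      by_cases h1 : c = '[' ∧ flag = false
      · have e1 : pvStepA (I, O, buf, flag) c = (I, O, [], true) := by
          simp only [pvStepA]; rw [if_pos h1]
        have e2 : pvStepS (outs, ins, buf, flag) c = (outs ++ [buf], ins, [], true) := by
          simp only [pvStepS]; rw [if_pos h1]
        rw [e1, e2]
        refine ih I O [] true (outs ++ [buf]) ins ?_ ?_
        · intro t; rw [hI]; simp [pvWins, pvAbaR, h1.2]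
        · intro t; rw [hO]; simp [pvWins, pvAbaR, h1.2]
      · by_cases h2 : c = ']' ∧ flag = true
        · have e1 : pvStepA (I, O, buf, flag) c = (I, O, [], false) := by
            simp only [pvStepA]; rw [if_neg h1, if_pos h2]
          have e2 : pvStepS (outs, ins, buf, flag) c = (outs, ins ++ [buf], [], false) := by
            simp only [pvStepS]; rw [if_neg h1, if_pos h2]
          rw [e1, e2]
          refine ih I O [] false outs (ins ++ [buf]) ?_ ?_
          · intro t; rw [hI]; simp [pvWins, pvAbaR, h2.2]
          · intro t; rw [hO]; simp [pvWins, pvAbaR, h2.2]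
        · have e2 : pvStepS (outs, ins, buf, flag) c = (outs, ins, buf ++ [c], flag) := by
            simp only [pvStepS]; rw [if_neg h1, if_neg h2]
          rw [e2]
          rcases buf.eq_nil_or_concat with hb | ⟨m1, x2, hb⟩
          · subst hb
            have e1 : pvStepA (I, O, ([] : List Char), flag) c = (I, O, [c], flag) := by
              simp only [pvStepA]; rw [if_neg h1, if_neg h2]; simp
            rw [e1]
            refine ih I O [c] flag outs ins ?_ ?_
            · intro t; rw [hI]; simp [pvWins, pvAbaR]
            · intro t; rw [hO]; simp [pvWins, pvAbaR]
          · rcases m1.eq_nil_or_concat with hm | ⟨m, x1, hm⟩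
            · subst hm
              simp only [List.concat_eq_append, List.nil_append] at hb
              subst hb
              have e1 : pvStepA (I, O, [x2], flag) c = (I, O, [x2, c], flag) := by
                simp only [pvStepA]; rw [if_neg h1, if_neg h2]; simp
              rw [e1]
              refine ih I O [x2, c] flag outs ins ?_ ?_
              · intro t; rw [hI]; simp [pvWins, pvAbaR]
              · intro t; rw [hO]; simp [pvWins, pvAbaR]
            · subst hm
              simp only [List.concat_eq_append] at hb
              subst hb
              have hbuf : (m ++ [x1]) ++ [x2] ++ [c] = m ++ [x1, x2, c] := by simp
              have hwin : pvAbaR (m ++ [x1, x2, c]) =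
                  pvAbaR ((m ++ [x1]) ++ [x2]) ++ (if x1 = c ∧ x1 ≠ x2 then [(x1, x2)] else []) := by
                rw [pvAbaR_snoc3]; simp
              by_cases hc : x1 = c ∧ x1 ≠ x2
              · obtain ⟨hx, hne⟩ := hc
                subst hx
                have hwin2 : pvAbaR (m ++ [x1, x2, x1]) =
                    pvAbaR ((m ++ [x1]) ++ [x2]) ++ [(x1, x2)] := by
                  rw [pvAbaR_snoc3]; simp [hne]
                cases flag with
                | true =>
                    have hne2 : x1 ≠ ']' := fun h => h2 ⟨h, rfl⟩
                    have e1 : pvStepA (I, O, (m ++ [x1]) ++ [x2], true) x1 =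
                        (PySem.Set.add I (x1, x2, x1), O, m ++ [x1, x2, x1], true) := by
                      simp [pvStepA, hbuf, g1, g2, g3, hne, hne2]
                    rw [e1, hbuf]
                    refine ih _ O (m ++ [x1, x2, x1]) true outs ins ?_ ?_
                    · intro t
                      rw [PySem.Set.mem_add, hI]
                      simp only [pvWins, hwin2, List.mem_append, List.mem_singleton, if_true]
                      constructor
                      · rintro (⟨p, hp, rfl⟩ | rfl)
                        · exact ⟨p, by tauto, rfl⟩
                        · exact ⟨(x1, x2), by tauto, rfl⟩
                      · rintro ⟨p, hp | (hp | rfl), rfl⟩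
                        · exact Or.inl ⟨p, by tauto, rfl⟩
                        · exact Or.inl ⟨p, by tauto, rfl⟩
                        · exact Or.inr rfl
                    · intro t; rw [hO]; simp [pvWins]
                | false =>
                    have hne2 : x1 ≠ '[' := fun h => h1 ⟨h, rfl⟩
                    have e1 : pvStepA (I, O, (m ++ [x1]) ++ [x2], false) x1 =
                        (I, PySem.Set.add O (x2, x1, x2), m ++ [x1, x2, x1], false) := by
                      simp [pvStepA, hbuf, g1, g2, g3, hne, hne2]
                    rw [e1, hbuf]
                    refine ih I _ (m ++ [x1, x2, x1]) false outs ins ?_ ?_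
                    · intro t; rw [hI]; simp [pvWins]
                    · intro t
                      rw [PySem.Set.mem_add, hO]
                      simp only [pvWins, hwin2, List.mem_append, List.mem_singleton,
                        Bool.not_false, if_true]
                      constructor
                      · rintro (⟨p, hp, rfl⟩ | rfl)
                        · exact ⟨p, by tauto, rfl⟩
                        · exact ⟨(x1, x2), by tauto, rfl⟩
                      · rintro ⟨p, hp | (hp | rfl), rfl⟩
                        · exact Or.inl ⟨p, by tauto, rfl⟩
                        · exact Or.inl ⟨p, by tauto, rfl⟩
                        · exact Or.inr rfl
              · have hg : ¬(PySem.List.pyGetD (m ++ [x1, x2, c]) (-3) c = PySem.List.pyGetD (m ++ [x1, x2, c]) (-1) c ∧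
                    PySem.List.pyGetD (m ++ [x1, x2, c]) (-3) c ≠ PySem.List.pyGetD (m ++ [x1, x2, c]) (-2) c) := by
                  simp only [g1, g2, g3]; exact fun h => hc ⟨h.1, h.2⟩
                have e1 : pvStepA (I, O, (m ++ [x1]) ++ [x2], flag) c =
                    (I, O, m ++ [x1, x2, c], flag) := by
                  rcases flag with _ | _
                  · have hne2 : c ≠ '[' := fun h => h1 ⟨h, rfl⟩
                    simp [pvStepA, hbuf, hne2, hg]
                  · have hne2 : c ≠ ']' := fun h => h2 ⟨h, rfl⟩
                    simp [pvStepA, hbuf, hne2, hg]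
                rw [e1, hbuf]
                refine ih I O (m ++ [x1, x2, c]) flag outs ins ?_ ?_
                · intro t; rw [hI]; simp only [pvWins, hwin, if_neg hc, List.append_nil]
                · intro t; rw [hO]; simp only [pvWins, hwin, if_neg hc, List.append_nil]

theorem slice2 (s : List Char) : PySem.List.slice s (some 2) none = s.drop 2 := by
  exact_mod_cast PySem.List.slice_from_natCast s 2

theorem zipform (s : List Char) :
    ((s.zip ((s.drop 1).zip (s.drop 2))).filter
      (fun t => t.1 == t.2.2 && t.1 != t.2.1)).map (fun t => (t.1, t.2.1)) = pvAbaR s := by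
  induction s using pvAbaR.induct with
  | case1 a b c rest ih =>
      simp only [List.drop, pvAbaR, List.zip_cons_cons, List.filter_cons] at *
      by_cases h1 : a = c <;> by_cases h2 : a = b <;>
        simp [h1, h2, ih] <;> simp_all
  | case2 s h =>
      match s with
      | [] => rfl
      | [a] => rfl
      | [a, b] => rfl
      | a :: b :: c :: r => exact absurd rfl (h a b c r)

theorem pvAbas_eq_abaR (s : List Char) : pvAbas s = pvAbaR s := by
  unfold pvAbas
  rw [PySem.List.slice_from_one, slice2, ← List.drop_one, zipform]

theorem mem_foldl_update (L : List (List Char)) (f : List Char → List (Char × Char)) :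
    ∀ (s0 : PySem.Set (Char × Char)) (y : Char × Char),
      y ∈ L.foldl (fun ab s => PySem.Set.update ab (f s)) s0 ↔ y ∈ s0 ∨ ∃ s ∈ L, y ∈ f s := by
  induction L with
  | nil => simp
  | cons a L ih =>
      intro s0 y
      simp only [List.foldl_cons, ih, PySem.Set.mem_update, List.mem_cons]
      aesop

theorem pv_main (ip : String) : is_ssl ip = is_ssl_alt ip := by
  obtain ⟨hbuf, hflag, hIc, hOc⟩ := pv_inv ip.toList PySem.Set.empty PySem.Set.empty [] false [] []
    (by intro t; simp [pvWins, pvAbaR, PySem.Set.empty])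
    (by intro t; simp [pvWins, pvAbaR, PySem.Set.empty])
  unfold is_ssl is_ssl_alt
  apply Bool.eq_iff_iff.mpr
  simp only [decide_eq_true_eq, List.any_eq_true]
  set sa := ip.toList.foldl pvStepA (PySem.Set.empty, PySem.Set.empty, [], false) with hsa
  set sb := ip.toList.foldl pvStepS ([], [], [], false) with hsb
  have key : ∀ (insegs outsegs : List (List Char)),
      insegs.flatMap pvAbaR = pvWins sb.2.1 sb.2.2.1 sb.2.2.2 →
      outsegs.flatMap pvAbaR = pvWins sb.1 sb.2.2.1 (!sb.2.2.2) →
      ((0 < (PySem.Set.inter sa.1 sa.2.1).length) ↔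
        ∃ s ∈ insegs, ∃ p ∈ pvAbas s,
          PySem.Set.contains
            (outsegs.foldl (fun ab s => PySem.Set.update ab (pvAbas s)) PySem.Set.empty)
            (p.2, p.1) = true) := by
    intro insegs outsegs hin hout
    rw [List.length_pos_iff_exists_mem]
    constructor
    · rintro ⟨t, ht⟩
      rw [PySem.Set.mem_inter] at ht
      obtain ⟨p, hp, rfl⟩ := (hIc t).mp ht.1
      obtain ⟨q, hq, he⟩ := (hOc _).mp ht.2
      have hq2 : q = (p.2, p.1) := by
        have h1 : p.1 = q.2 := congrArg Prod.fst he
        have h2 : p.2 = q.1 := congrArg Prod.fst (congrArg Prod.snd he)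
        cases q; simp_all
      rw [← hin] at hp
      obtain ⟨s, hs, hps⟩ := List.mem_flatMap.mp hp
      refine ⟨s, hs, p, by rw [pvAbas_eq_abaR]; exact hps, ?_⟩
      rw [PySem.Set.contains_iff, mem_foldl_update]
      right
      rw [← hq2]
      rw [← hout] at hq
      obtain ⟨s', hs', hqs'⟩ := List.mem_flatMap.mp hq
      exact ⟨s', hs', by rw [pvAbas_eq_abaR]; exact hqs'⟩
    · rintro ⟨s, hs, p, hp, hcont⟩
      rw [PySem.Set.contains_iff, mem_foldl_update] at hcont
      rcases hcont with h | ⟨s', hs', hq⟩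
      · simp [PySem.Set.empty] at h
      · refine ⟨(p.1, p.2, p.1), ?_⟩
        rw [PySem.Set.mem_inter]
        constructor
        · exact (hIc _).mpr ⟨p, by rw [← hin]; exact List.mem_flatMap.mpr ⟨s, hs, by rw [← pvAbas_eq_abaR]; exact hp⟩, rfl⟩
        · refine (hOc _).mpr ⟨(p.2, p.1), ?_, rfl⟩
          rw [← hout]
          exact List.mem_flatMap.mpr ⟨s', hs', by rw [← pvAbas_eq_abaR]; exact hq⟩
  cases hfl : sb.2.2.2 with
  | true =>
      rw [if_pos rfl]
      refine key _ _ ?_ ?_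
      · simp [pvWins, hfl]
      · simp [pvWins, hfl]
  | false =>
      rw [if_neg (by simp)]
      refine key _ _ ?_ ?_
      · simp [pvWins, hfl]
      · simp [pvWins, hfl]

-- ===== VERDICT (by name: the statement is the Claim_ definition above) =====
theorem is_ssl_spec : Claim_equal_is_ssl := by
  intro ip _
  exact pv_main ip
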